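-- pv_equiv track=rewrite | github.com/anshuplugs11/music-bot-final- | broadcast_manager.py | parse_broadcast_options
-- ===== SOURCE A (Python) =====
-- def parse_broadcast_options(text: str) -> tuple:
--     """Parse broadcast command options"""
--     options = {
--         "pin": False,
--         "pinloud": False,
--         "user": False,
--         "assistant": False,
--         "nobot": False
--     }
--
--     parts = text.split()
--     message_parts = []
--
--     for part in parts:
--         if part.startswith("-"):
--             option = part[1:].lower()
--             if option in options:
--                 options[option] = True
--         else:
--             message_parts.append(part)
--
--     message = " ".join(message_parts)
--     return message, options
-- ===== SOURCE B (Python) =====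
-- def parse_broadcast_options(text: str) -> tuple:
--     """Parse broadcast command options (flags-by-scan formulation)."""
--     parts = text.split()
--     message = " ".join(p for p in parts if not p.startswith("-"))
--     options = {
--         opt: any(p.startswith("-") and p[1:].lower() == opt for p in parts)
--         for opt in ("pin", "pinloud", "user", "assistant", "nobot")
--     }
--     return message, options
-- ===== Notes on version B (the rewrite author's own statement) =====
-- stated objective: idiomatic
-- what changed: Replaces A's single stateful dispatch pass (mutable options dict plus message accumulator) with a filter+join for the message and an independent per-flag any()-scan comprehension building the options dict.
import Mathlib
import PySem

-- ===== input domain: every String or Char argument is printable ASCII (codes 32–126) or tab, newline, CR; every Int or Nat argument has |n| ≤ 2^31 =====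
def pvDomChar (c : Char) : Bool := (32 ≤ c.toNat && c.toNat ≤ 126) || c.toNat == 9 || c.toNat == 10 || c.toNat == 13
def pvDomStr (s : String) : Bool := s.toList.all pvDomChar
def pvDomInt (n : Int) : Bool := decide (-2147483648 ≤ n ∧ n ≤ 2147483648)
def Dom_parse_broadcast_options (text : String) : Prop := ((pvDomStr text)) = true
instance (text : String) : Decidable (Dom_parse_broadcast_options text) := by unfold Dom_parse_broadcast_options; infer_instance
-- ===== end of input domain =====

-- B replaces A's single token-dispatch pass (mutable dict + message accumulator) by a filter+join
-- for the message and an independent per-flag any-scan for each option (idiomatic decomposition).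

-- ===== PORT A =====
-- one iteration of A's `for part in parts` loop over the state (options dict, message_parts)
def pbStepA (st : PySem.Dict String Bool × List String) (part : String) :
    PySem.Dict String Bool × List String :=
  if PySem.Str.startswith part "-" then
    let option := PySem.Str.lower (PySem.Str.slice part (some 1) none)
    if st.1.contains option then (st.1.insert option true, st.2) else st
  else (st.1, st.2 ++ [part])

def parse_broadcast_options (text : String) : String × (List (String × Bool)) :=
  let options : PySem.Dict String Bool :=
    PySem.Dict.ofList [("pin", false), ("pinloud", false), ("user", false),
                       ("assistant", false), ("nobot", false)]
  let parts := PySem.Str.split₀ text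
  let r := parts.foldl pbStepA (options, [])
  (PySem.Str.join " " r.2, r.1.items)

-- ===== PORT B =====
def parse_broadcast_options_alt (text : String) : String × (List (String × Bool)) :=
  let parts := PySem.Str.split₀ text
  let message := PySem.Str.join " " (parts.filter (fun p => !PySem.Str.startswith p "-"))
  let options := ["pin", "pinloud", "user", "assistant", "nobot"].map (fun opt =>
    (opt, parts.any (fun p =>
      PySem.Str.startswith p "-" && (PySem.Str.lower (PySem.Str.slice p (some 1) none) == opt))))
  (message, options)

-- ===== PRECONDITION & SPEC =====
def Spec_parse_broadcast_options (text : String) (out : String × (List (String × Bool))) : Prop := out = parse_broadcast_options_alt text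
instance (text : String) (out : String × (List (String × Bool))) : Decidable (Spec_parse_broadcast_options text out) := by unfold Spec_parse_broadcast_options; infer_instance

-- ===== CLAIM (what is proved, stated in full; the proofs are below) =====
def Claim_equal_parse_broadcast_options : Prop := ∀ (text : String), Dom_parse_broadcast_options text → Spec_parse_broadcast_options text (parse_broadcast_options text)

-- ===== LEMMAS AND PROOFS =====

-- the token-level match predicate shared by both sides
def pbHit (k p : String) : Bool :=
  PySem.Str.startswith p "-" && (PySem.Str.lower (PySem.Str.slice p (some 1) none) == k)

-- A's loop invariant: folding over any token list from the 5-key literal dict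
-- flips each flag to (old ∨ some token hits it) and appends the non-flag tokens.
theorem pbLoop (parts : List String) (b1 b2 b3 b4 b5 : Bool) (acc : List String) :
    parts.foldl pbStepA
      (PySem.Dict.mk [("pin", b1), ("pinloud", b2), ("user", b3), ("assistant", b4), ("nobot", b5)], acc) =
    (PySem.Dict.mk [("pin", b1 || parts.any (pbHit "pin")),
                    ("pinloud", b2 || parts.any (pbHit "pinloud")),
                    ("user", b3 || parts.any (pbHit "user")),
                    ("assistant", b4 || parts.any (pbHit "assistant")),
                    ("nobot", b5 || parts.any (pbHit "nobot"))],
     acc ++ parts.filter (fun p => !PySem.Str.startswith p "-")) := by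
  induction parts generalizing b1 b2 b3 b4 b5 acc with
  | nil => simp
  | cons p ps ih =>
    by_cases hs : PySem.Str.startswith p "-" = true
    · have hs' : PySem.Chars.startswith p.toList ['-'] = true := by simpa using hs
      by_cases h1 : PySem.Str.lower (PySem.Str.slice p (some 1) none) = "pin"
      · simp only [List.foldl_cons, pbStepA, hs, if_true, h1]
        rw [show (PySem.Dict.mk [("pin", b1), ("pinloud", b2), ("user", b3), ("assistant", b4), ("nobot", b5)]).insert "pin" true
              = PySem.Dict.mk [("pin", true), ("pinloud", b2), ("user", b3), ("assistant", b4), ("nobot", b5)] by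
              apply PySem.Dict.ext; simp [PySem.Dict.items_insert_of_contains]]
        simp [ih, pbHit, hs', h1]
      · by_cases h2 : PySem.Str.lower (PySem.Str.slice p (some 1) none) = "pinloud"
        · simp only [List.foldl_cons, pbStepA, hs, if_true, h2]
          rw [show (PySem.Dict.mk [("pin", b1), ("pinloud", b2), ("user", b3), ("assistant", b4), ("nobot", b5)]).insert "pinloud" true
                = PySem.Dict.mk [("pin", b1), ("pinloud", true), ("user", b3), ("assistant", b4), ("nobot", b5)] by
                apply PySem.Dict.ext; simp [PySem.Dict.items_insert_of_contains]]
          simp [ih, pbHit, hs', h2]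
        · by_cases h3 : PySem.Str.lower (PySem.Str.slice p (some 1) none) = "user"
          · simp only [List.foldl_cons, pbStepA, hs, if_true, h3]
            rw [show (PySem.Dict.mk [("pin", b1), ("pinloud", b2), ("user", b3), ("assistant", b4), ("nobot", b5)]).insert "user" true
                  = PySem.Dict.mk [("pin", b1), ("pinloud", b2), ("user", true), ("assistant", b4), ("nobot", b5)] by
                  apply PySem.Dict.ext; simp [PySem.Dict.items_insert_of_contains]]
            simp [ih, pbHit, hs', h3]
          · by_cases h4 : PySem.Str.lower (PySem.Str.slice p (some 1) none) = "assistant"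
            · simp only [List.foldl_cons, pbStepA, hs, if_true, h4]
              rw [show (PySem.Dict.mk [("pin", b1), ("pinloud", b2), ("user", b3), ("assistant", b4), ("nobot", b5)]).insert "assistant" true
                    = PySem.Dict.mk [("pin", b1), ("pinloud", b2), ("user", b3), ("assistant", true), ("nobot", b5)] by
                    apply PySem.Dict.ext; simp [PySem.Dict.items_insert_of_contains]]
              simp [ih, pbHit, hs', h4]
            · by_cases h5 : PySem.Str.lower (PySem.Str.slice p (some 1) none) = "nobot"
              · simp only [List.foldl_cons, pbStepA, hs, if_true, h5]
                rw [show (PySem.Dict.mk [("pin", b1), ("pinloud", b2), ("user", b3), ("assistant", b4), ("nobot", b5)]).insert "nobot" true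
                      = PySem.Dict.mk [("pin", b1), ("pinloud", b2), ("user", b3), ("assistant", b4), ("nobot", true)] by
                      apply PySem.Dict.ext; simp [PySem.Dict.items_insert_of_contains]]
                simp [ih, pbHit, hs', h5]
              · simp only [List.foldl_cons, pbStepA, hs, if_true]
                rw [show (PySem.Dict.mk [("pin", b1), ("pinloud", b2), ("user", b3), ("assistant", b4), ("nobot", b5)]).contains
                      (PySem.Str.lower (PySem.Str.slice p (some 1) none)) = false by
                      simp; exact ⟨Ne.symm h1, Ne.symm h2, Ne.symm h3, Ne.symm h4, Ne.symm h5⟩]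
                have f1 : (PySem.Str.lower (PySem.Str.slice p (some 1) none) == "pin") = false := by simp [h1]
                have f2 : (PySem.Str.lower (PySem.Str.slice p (some 1) none) == "pinloud") = false := by simp [h2]
                have f3 : (PySem.Str.lower (PySem.Str.slice p (some 1) none) == "user") = false := by simp [h3]
                have f4 : (PySem.Str.lower (PySem.Str.slice p (some 1) none) == "assistant") = false := by simp [h4]
                have f5 : (PySem.Str.lower (PySem.Str.slice p (some 1) none) == "nobot") = false := by simp [h5]
                simp [ih, pbHit, hs', f1, f2, f3, f4, f5]
    · have hs' : PySem.Chars.startswith p.toList ['-'] = false := by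
        simpa using hs
      simp only [List.foldl_cons, pbStepA, hs, if_false, Bool.false_eq_true]
      simp [ih, pbHit, hs']

-- ===== VERDICT (by name: the statement is the Claim_ definition above) =====
theorem parse_broadcast_options_spec : Claim_equal_parse_broadcast_options := by
  intro text _
  show _ = _
  have hD : PySem.Dict.ofList [("pin", false), ("pinloud", false), ("user", false),
        ("assistant", false), ("nobot", false)]
      = PySem.Dict.mk [("pin", false), ("pinloud", false), ("user", false),
        ("assistant", false), ("nobot", false)] := by decide
  simp only [parse_broadcast_options, parse_broadcast_options_alt, hD]
  rw [pbLoop]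
  simp [pbHit, List.any_eq]
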